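-- pv_equiv track=rewrite | github.com/Ferdinand-AK/cortonaProjects | Datentypen.py | istFloatZahl
-- ===== SOURCE A (Python) =====
-- def istFloatZahl(textNummer):
--     countComma = 0
--     for c in textNummer:
--         if not c.isdigit():
--             if c == "." or c == ",":
--                 countComma += 1
--             else:
--                 return False
--
--     if countComma == 1:
--         return True
--     else:
--         return False
-- ===== SOURCE B (Python) =====
-- def istFloatZahl(textNummer):
--     seps = textNummer.count('.') + textNummer.count(',')
--     if seps != 1:
--         return False
--     return all(c.isdigit() for c in textNummer if c not in '.,')
-- ===== Notes on version B (the rewrite author's own statement) =====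
-- stated objective: simpler
-- what changed: Replaces the interleaved char-by-char loop with an early-return counter by two substring counts followed by an all() digit check over the non-separator characters.
import Mathlib
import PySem

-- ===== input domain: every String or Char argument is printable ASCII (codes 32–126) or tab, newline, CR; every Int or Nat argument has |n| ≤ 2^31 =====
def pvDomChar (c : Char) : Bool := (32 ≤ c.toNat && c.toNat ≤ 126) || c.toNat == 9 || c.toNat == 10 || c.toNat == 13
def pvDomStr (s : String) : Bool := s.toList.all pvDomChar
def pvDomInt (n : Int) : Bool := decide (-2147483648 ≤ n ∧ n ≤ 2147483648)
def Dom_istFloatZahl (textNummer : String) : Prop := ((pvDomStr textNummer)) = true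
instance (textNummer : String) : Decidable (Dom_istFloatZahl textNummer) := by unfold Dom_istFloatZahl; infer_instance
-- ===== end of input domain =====

-- Header: B replaces A's interleaved early-return loop by count-then-validate (two separator counts, then an all-digits check); proved equal on the ASCII domain.
-- ===== PORT A =====
def istAuxA : List Char → Int → Bool
  | [], countComma => countComma == 1
  | c :: cs, countComma =>
    if !(PySem.Chars.isdigit c) then
      if c == '.' || c == ',' then istAuxA cs (countComma + 1)
      else false
    else istAuxA cs countComma

def istFloatZahl (textNummer : String) : Bool :=
  istAuxA textNummer.toList 0

-- ===== PORT B =====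
def istFloatZahl_alt (textNummer : String) : Bool :=
  let seps := PySem.Str.count textNummer "." + PySem.Str.count textNummer ","
  if seps ≠ 1 then false
  else (textNummer.toList.filter (fun c => !(c == '.' || c == ','))).all PySem.Chars.isdigit

-- ===== PRECONDITION & SPEC =====
def Spec_istFloatZahl (textNummer : String) (out : Bool) : Prop := out = istFloatZahl_alt textNummer
instance (textNummer : String) (out : Bool) : Decidable (Spec_istFloatZahl textNummer out) := by unfold Spec_istFloatZahl; infer_instance

-- ===== CLAIM (what is proved, stated in full; the proofs are below) =====
def Claim_equal_istFloatZahl : Prop := ∀ (textNummer : String), Dom_istFloatZahl textNummer → Spec_istFloatZahl textNummer (istFloatZahl textNummer)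

-- ===== LEMMAS AND PROOFS =====

-- Python's str.count with a single-character needle is just the character count.
lemma count_go_singleton (ch : Char) (l : List Char) (fuel : Nat) (acc : Nat)
    (h : l.length ≤ fuel) :
    PySem.Chars.count.go [ch] fuel l acc = acc + l.count ch := by
  induction l generalizing fuel acc with
  | nil => cases fuel <;> simp [PySem.Chars.count.go]
  | cons c cs ih =>
    cases fuel with
    | zero => simp at h
    | succ n =>
      simp only [List.length_cons, Nat.succ_le_succ_iff] at h
      by_cases hc : c = ch
      · subst hc
        simp [PySem.Chars.count.go, List.isPrefixOf, ih _ _ h]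
        omega
      · simp [PySem.Chars.count.go, List.isPrefixOf, hc, ih _ _ h, Ne.symm hc]

lemma count_singleton (ch : Char) (l : List Char) :
    PySem.Chars.count l [ch] = l.count ch := by
  simpa using count_go_singleton ch l l.length 0 le_rfl

-- digits are not separators
lemma isdigit_ne_dot {c : Char} (h : PySem.Chars.isdigit c = true) : c ≠ '.' := by
  rintro rfl; simp [PySem.Chars.isdigit] at h
lemma isdigit_ne_comma {c : Char} (h : PySem.Chars.isdigit c = true) : c ≠ ',' := by
  rintro rfl; simp [PySem.Chars.isdigit] at h

-- characterisation of A's loop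
lemma istAuxA_eq (l : List Char) (cnt : Int) :
    istAuxA l cnt =
      (l.all (fun c => PySem.Chars.isdigit c || c == '.' || c == ',') &&
        decide (cnt + (l.count '.' : Int) + (l.count ',' : Int) = 1)) := by
  induction l generalizing cnt with
  | nil =>
    simp only [istAuxA, List.all_nil, List.count_nil, Bool.true_and]
    cases h : (cnt == 1) <;> simp_all [beq_iff_eq]
  | cons c cs ih =>
    by_cases hd : PySem.Chars.isdigit c = true
    · have h1 := isdigit_ne_dot hd
      have h2 := isdigit_ne_comma hd
      simp [istAuxA, hd, ih, h1, h2]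
    · by_cases hs : (c == '.' || c == ',') = true
      · have : istAuxA (c :: cs) cnt = istAuxA cs (cnt + 1) := by
          simp [istAuxA, hd, hs]
        rw [this, ih]
        have hcnt : ((c :: cs).count '.' : Int) + ((c :: cs).count ',' : Int)
            = (cs.count '.' : Int) + (cs.count ',' : Int) + 1 := by
          rcases Bool.or_eq_true_iff.mp hs with h | h
          · have : c = '.' := by simpa using h
            subst this
            simp
            ring
          · have : c = ',' := by simpa using h
            subst this
            simp
            ring
        simp only [List.all_cons, hd, Bool.false_or, hs, Bool.true_and]
        congr 1
        rw [decide_eq_decide]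
        omega
      · simp [istAuxA, hd, hs]

-- the generator-with-filter all() equals the combined all()
lemma all_filter_eq (l : List Char) :
    (l.filter (fun c => !(c == '.' || c == ','))).all PySem.Chars.isdigit =
      l.all (fun c => PySem.Chars.isdigit c || c == '.' || c == ',') := by
  rw [List.all_filter]
  have hpt : ∀ c : Char, (!(!(c == '.' || c == ',')) || PySem.Chars.isdigit c)
      = (PySem.Chars.isdigit c || c == '.' || c == ',') := by
    intro c; cases h1 : (c == '.') <;> cases h2 : (c == ',') <;> simp_all
  simp only [hpt]

-- the final Boolean rearrangement: counter test vs count-first test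
lemma final_eq (allg : Bool) (n m : Nat) :
    (allg && decide ((0:Int) + (n:Int) + (m:Int) = 1)) = (if n + m ≠ 1 then false else allg) := by
  by_cases h : n + m = 1
  · have hi : ((n:Int) + (m:Int) = 1) := by omega
    simp [h, hi]
  · have hi : ¬((n:Int) + (m:Int) = 1) := by omega
    simp [h]
    intro _
    omega

-- ===== VERDICT (by name: the statement is the Claim_ definition above) =====
theorem istFloatZahl_spec : Claim_equal_istFloatZahl := by
  intro t _
  unfold Spec_istFloatZahl istFloatZahl istFloatZahl_alt
  rw [istAuxA_eq]
  simp only [PySem.Str.count, show (".".toList) = ['.'] from rfl,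
    show (",".toList) = [','] from rfl, count_singleton, all_filter_eq]
  exact final_eq _ _ _
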